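-- pv_equiv track=rewrite | github.com/JBreitenbr/spotidjango | 12-2025.py | daylight_hours
-- ===== SOURCE A (Python) =====
-- def daylight_hours(lat):
--     lats=[-90,-75,-60,-45,-30,-15,0,15,30,45,60,75,90]
--     vals=[24,23,21,15,13,12,12,11,10,9,6,2,0]
--     diff=[]
--     for i in range(len(lats)):
--         diff.append(abs(lats[i]-lat))
--     ind=diff.index(min(diff))
--     return vals[ind]
-- ===== SOURCE B (Python) =====
-- def daylight_hours(lat):
--     # The table latitudes are the multiples of 15 from -90 to 90, so the nearest
--     # tabulated latitude is found arithmetically: round lat to the nearest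
--     # multiple of 15 (ties cannot occur for integer lat) and clamp to the table.
--     vals=[24,23,21,15,13,12,12,11,10,9,6,2,0]
--     i=(2*lat+195)//30
--     if i<0:
--         i=0
--     elif i>12:
--         i=12
--     return vals[i]
-- ===== Notes on version B (the rewrite author's own statement) =====
-- stated objective: alternative
-- what changed: B replaces A's scan over the 13-entry latitude table (build diff list, min(), .index()) with a closed-form computation: since the table latitudes are exactly the multiples of 15 from -90 to 90, the nearest index is (2*lat+195)//30 clamped to [0,12] (ties are impossible for integer lat), followed by one table lookup.
import Mathlib
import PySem

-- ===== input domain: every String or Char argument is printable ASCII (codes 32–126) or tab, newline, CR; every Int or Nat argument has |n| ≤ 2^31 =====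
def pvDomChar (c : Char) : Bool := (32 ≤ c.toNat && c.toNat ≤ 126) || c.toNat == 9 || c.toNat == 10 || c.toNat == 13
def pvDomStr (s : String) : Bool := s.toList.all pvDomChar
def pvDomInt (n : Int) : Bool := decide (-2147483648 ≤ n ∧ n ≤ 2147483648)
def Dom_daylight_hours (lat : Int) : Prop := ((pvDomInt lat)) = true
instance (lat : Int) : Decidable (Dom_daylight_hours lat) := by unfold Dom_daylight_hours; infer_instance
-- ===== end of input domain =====

-- B replaces A's table scan (diff list + min + index) by a closed-form rounded-division index into the value table; alternative algorithm.


-- ===== PORT A =====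
-- diff is built by the same append-in-a-loop; min()/index() are PySem.List.min?/index?.
-- The .getD 0 fallbacks are never hit: diff is a nonempty literal-length list, so min? and
-- index? always return some, exactly as Python's min/.index never raise here.
def daylight_hours (lat : Int) : Int :=
  let lats : List Int := [-90,-75,-60,-45,-30,-15,0,15,30,45,60,75,90]
  let vals : List Int := [24,23,21,15,13,12,12,11,10,9,6,2,0]
  let diff : List Int :=
    (PySem.List.pyRange 0 (lats.length : Int) 1).foldl
      (fun acc i => acc ++ [|PySem.List.pyGetD lats i 0 - lat|]) []
  let ind : Nat := (PySem.List.index? diff ((PySem.List.min? diff id).getD 0)).getD 0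
  PySem.List.pyGetD vals (ind : Int) 0

-- ===== PORT B =====
-- closed form: nearest multiple of 15 in [-90,90] has index (2*lat+195)//30 clamped to [0,12];
-- '//' is PySem.Int.floordiv; the if/elif clamp is the same branch order as Source B.
def daylight_hours_alt (lat : Int) : Int :=
  let vals : List Int := [24,23,21,15,13,12,12,11,10,9,6,2,0]
  let i : Int := PySem.Int.floordiv (2 * lat + 195) 30
  let i : Int := if i < 0 then 0 else if i > 12 then 12 else i
  PySem.List.pyGetD vals i 0

-- ===== PRECONDITION & SPEC =====
def Spec_daylight_hours (lat : Int) (out : Int) : Prop := out = daylight_hours_alt lat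
instance (lat : Int) (out : Int) : Decidable (Spec_daylight_hours lat out) := by unfold Spec_daylight_hours; infer_instance

-- ===== CLAIM (what is proved, stated in full; the proofs are below) =====
def Claim_equal_daylight_hours : Prop := ∀ (lat : Int), Dom_daylight_hours lat → Spec_daylight_hours lat (daylight_hours lat)

-- ===== LEMMAS AND PROOFS =====

-- A's diff list, evaluated to its 13 symbolic entries
theorem pv_diff_eq (lat : Int) :
    (PySem.List.pyRange 0 ((([-90, -75, -60, -45, -30, -15, 0, 15, 30, 45, 60, 75, 90] : List Int).length : Nat) : Int) 1).foldl
      (fun acc i => acc ++ [|PySem.List.pyGetD ([-90, -75, -60, -45, -30, -15, 0, 15, 30, 45, 60, 75, 90] : List Int) i 0 - lat|]) []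
    = [|(-90:Int) - lat|, |(-75:Int) - lat|, |(-60:Int) - lat|, |(-45:Int) - lat|, |(-30:Int) - lat|, |(-15:Int) - lat|, |(0:Int) - lat|, |(15:Int) - lat|, |(30:Int) - lat|, |(45:Int) - lat|, |(60:Int) - lat|, |(75:Int) - lat|, |(90:Int) - lat|] := by
  rw [show PySem.List.pyRange 0 ((([-90, -75, -60, -45, -30, -15, 0, 15, 30, 45, 60, 75, 90] : List Int).length : Nat) : Int) 1 = [0,1,2,3,4,5,6,7,8,9,10,11,12] from by decide]
  simp [PySem.List.pyGetD, PySem.List.pyGet?, PySem.List.pyIdx?]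

theorem pv_A_low (lat : Int) (h : lat ≤ -83) : daylight_hours lat = 24 := by
  simp only [daylight_hours]
  rw [pv_diff_eq]
  rcases hmin : PySem.List.min? [|(-90:Int) - lat|, |(-75:Int) - lat|, |(-60:Int) - lat|, |(-45:Int) - lat|, |(-30:Int) - lat|, |(-15:Int) - lat|, |(0:Int) - lat|, |(15:Int) - lat|, |(30:Int) - lat|, |(45:Int) - lat|, |(60:Int) - lat|, |(75:Int) - lat|, |(90:Int) - lat|] id with _ | v
  · exact absurd ((PySem.List.min?_eq_none_iff _ _).mp hmin) (by simp)
  have hvmem := PySem.List.min?_mem hmin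
  have hvmin := PySem.List.min?_isMin hmin (|(-90:Int) - lat|) (by simp)
  have hv : v = |(-90:Int) - lat| := by
    simp only [List.mem_cons, List.not_mem_nil, or_false] at hvmem
    rcases hvmem with rfl|rfl|rfl|rfl|rfl|rfl|rfl|rfl|rfl|rfl|rfl|rfl|rfl
    · rfl
    all_goals (exfalso; simp only [id_eq, Int.abs_eq_natAbs] at hvmin; omega)
  rw [Option.getD_some, hv, PySem.List.index?_cons_self]
  rfl

theorem pv_A_high (lat : Int) (h : 83 ≤ lat) : daylight_hours lat = 0 := by
  simp only [daylight_hours]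
  rw [pv_diff_eq]
  rcases hmin : PySem.List.min? [|(-90:Int) - lat|, |(-75:Int) - lat|, |(-60:Int) - lat|, |(-45:Int) - lat|, |(-30:Int) - lat|, |(-15:Int) - lat|, |(0:Int) - lat|, |(15:Int) - lat|, |(30:Int) - lat|, |(45:Int) - lat|, |(60:Int) - lat|, |(75:Int) - lat|, |(90:Int) - lat|] id with _ | v
  · exact absurd ((PySem.List.min?_eq_none_iff _ _).mp hmin) (by simp)
  have hvmem := PySem.List.min?_mem hmin
  have hvmin := PySem.List.min?_isMin hmin (|(90:Int) - lat|) (by simp)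
  have hv : v = |(90:Int) - lat| := by
    simp only [List.mem_cons, List.not_mem_nil, or_false] at hvmem
    rcases hvmem with rfl|rfl|rfl|rfl|rfl|rfl|rfl|rfl|rfl|rfl|rfl|rfl|rfl
    all_goals (first
      | rfl
      | (exfalso; simp only [id_eq, Int.abs_eq_natAbs] at hvmin; omega))
  have hnot : |(90:Int) - lat| ∉ ([|(-90:Int) - lat|, |(-75:Int) - lat|, |(-60:Int) - lat|, |(-45:Int) - lat|, |(-30:Int) - lat|, |(-15:Int) - lat|, |(0:Int) - lat|, |(15:Int) - lat|, |(30:Int) - lat|, |(45:Int) - lat|, |(60:Int) - lat|, |(75:Int) - lat|] : List Int) := by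
    simp only [List.mem_cons, List.not_mem_nil, or_false, not_or, Int.abs_eq_natAbs]
    omega
  rw [Option.getD_some, hv,
      show ([|(-90:Int) - lat|, |(-75:Int) - lat|, |(-60:Int) - lat|, |(-45:Int) - lat|, |(-30:Int) - lat|, |(-15:Int) - lat|, |(0:Int) - lat|, |(15:Int) - lat|, |(30:Int) - lat|, |(45:Int) - lat|, |(60:Int) - lat|, |(75:Int) - lat|, |(90:Int) - lat|] : List Int) = [|(-90:Int) - lat|, |(-75:Int) - lat|, |(-60:Int) - lat|, |(-45:Int) - lat|, |(-30:Int) - lat|, |(-15:Int) - lat|, |(0:Int) - lat|, |(15:Int) - lat|, |(30:Int) - lat|, |(45:Int) - lat|, |(60:Int) - lat|, |(75:Int) - lat|] ++ [|(90:Int) - lat|] from rfl,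
      PySem.List.index?_append_singleton_self _ _ hnot]
  rfl

theorem pv_B_low (lat : Int) (h : lat ≤ -83) : daylight_hours_alt lat = 24 := by
  simp only [daylight_hours_alt]
  rw [PySem.Int.floordiv_eq_ediv_of_pos (by omega)]
  have hle : (2 * lat + 195) / 30 ≤ 0 := by omega
  rcases lt_or_eq_of_le hle with hlt | heq
  · rw [if_pos hlt]; rfl
  · rw [if_neg (by omega), if_neg (by omega), heq]; rfl

theorem pv_B_high (lat : Int) (h : 83 ≤ lat) : daylight_hours_alt lat = 0 := by
  simp only [daylight_hours_alt]
  rw [PySem.Int.floordiv_eq_ediv_of_pos (by omega)]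
  have hge : 12 ≤ (2 * lat + 195) / 30 := by omega
  rcases lt_or_eq_of_le hge with hlt | heq
  · rw [if_neg (by omega), if_pos hlt]; rfl
  · rw [if_neg (by omega), if_neg (by omega), ← heq]; rfl

set_option maxRecDepth 100000 in
theorem pv_mid : ∀ lat ∈ PySem.List.pyRange (-82) 83 1, daylight_hours lat = daylight_hours_alt lat := by
  decide

-- ===== VERDICT (by name: the statement is the Claim_ definition above) =====
theorem daylight_hours_spec : Claim_equal_daylight_hours := by
  intro lat _
  unfold Spec_daylight_hours
  by_cases h : lat ≤ -83
  · rw [pv_A_low lat h, pv_B_low lat h]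
  · by_cases h2 : 83 ≤ lat
    · rw [pv_A_high lat h2, pv_B_high lat h2]
    · exact pv_mid lat (by rw [PySem.List.mem_pyRange_one]; omega)
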